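-- pv_equiv track=rewrite | github.com/joaomatheusvillarim/prog1 | atendimento.py | filas_de_atendimento
-- ===== SOURCE A (Python) =====
-- def filas_de_atendimento(fila_unica, n):
-- 	medicos = []
-- 	for i in range(n):
-- 		medicos.append([])
-- 	for i in range(len(fila_unica)):
-- 		for j in range(n):
-- 			if i%n == j:
-- 				medicos[j].append(fila_unica[i])
-- 	return medicos
-- ===== SOURCE B (Python) =====
-- def filas_de_atendimento(fila_unica, n):
--     if n <= 0:
--         return []
--     medicos = [[] for _ in range(n)]
--     for i, paciente in enumerate(fila_unica):
--         medicos[i % n].append(paciente)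
--     return medicos
-- ===== Notes on version B (the rewrite author's own statement) =====
-- stated objective: faster
-- what changed: B drops A's inner scan over all n queues per patient and appends each patient directly to queue i % n (with an explicit guard returning [] for n <= 0, where A's loops are empty).
import Mathlib
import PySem

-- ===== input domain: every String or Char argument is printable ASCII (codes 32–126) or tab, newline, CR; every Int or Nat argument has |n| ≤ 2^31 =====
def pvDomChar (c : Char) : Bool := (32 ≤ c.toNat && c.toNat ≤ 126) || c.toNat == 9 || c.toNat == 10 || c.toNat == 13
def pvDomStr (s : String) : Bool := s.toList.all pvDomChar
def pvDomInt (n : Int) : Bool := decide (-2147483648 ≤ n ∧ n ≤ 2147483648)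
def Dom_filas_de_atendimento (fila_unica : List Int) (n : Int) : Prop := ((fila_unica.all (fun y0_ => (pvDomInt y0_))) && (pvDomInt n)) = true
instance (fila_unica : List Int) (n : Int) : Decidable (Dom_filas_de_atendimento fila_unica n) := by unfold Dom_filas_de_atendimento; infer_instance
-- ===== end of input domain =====

-- B replaces A's inner scan over all n queues per patient by a direct append to queue i % n (faster, O(len+n) vs O(len*n)).

-- ===== PORT A =====
def filas_de_atendimento (fila_unica : List Int) (n : Int) : List (List Int) :=
  let medicos : List (List Int) :=
    (PySem.List.pyRange 0 n 1).foldl (fun m _ => m ++ [([] : List Int)]) []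
  (PySem.List.pyRange 0 (fila_unica.length : Int) 1).foldl
    (fun m i =>
      (PySem.List.pyRange 0 n 1).foldl
        (fun m2 j =>
          if PySem.Int.mod i n == j then
            -- medicos[j].append(fila_unica[i]); j and i are in range in every reached state
            PySem.List.pySetD m2 j (PySem.List.pyGetD m2 j [] ++ [PySem.List.pyGetD fila_unica i 0])
          else m2) m) medicos

-- ===== PORT B =====
def filas_de_atendimento_alt (fila_unica : List Int) (n : Int) : List (List Int) :=
  if n ≤ 0 then []
  else
    let medicos : List (List Int) := (PySem.List.pyRange 0 n 1).map (fun _ => ([] : List Int))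
    (PySem.List.enumerate fila_unica 0).foldl
      (fun m ip =>
        -- medicos[i % n].append(paciente); i % n is in range since n > 0
        PySem.List.pySetD m (PySem.Int.mod ip.1 n)
          (PySem.List.pyGetD m (PySem.Int.mod ip.1 n) [] ++ [ip.2])) medicos

-- ===== PRECONDITION & SPEC =====
def Spec_filas_de_atendimento (fila_unica : List Int) (n : Int) (out : List (List Int)) : Prop := out = filas_de_atendimento_alt fila_unica n
instance (fila_unica : List Int) (n : Int) (out : List (List Int)) : Decidable (Spec_filas_de_atendimento fila_unica n out) := by unfold Spec_filas_de_atendimento; infer_instance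

-- ===== CLAIM (what is proved, stated in full; the proofs are below) =====
def Claim_equal_filas_de_atendimento : Prop := ∀ (fila_unica : List Int) (n : Int), Dom_filas_de_atendimento fila_unica n → Spec_filas_de_atendimento fila_unica n (filas_de_atendimento fila_unica n)

-- ===== LEMMAS AND PROOFS =====

-- folding a function that ignores the elements leaves the accumulator unchanged
theorem pv_foldl_const {α β : Type} (l : List α) (m : β) :
    l.foldl (fun acc _ => acc) m = m := by
  induction l generalizing m with
  | nil => rfl
  | cons x xs ih => simp only [List.foldl_cons]; exact ih m

-- the fold of "if t == j then g acc else acc" over range(0, n) fires exactly once, at j = t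
theorem pv_foldl_range_ite {β : Type} (n t : Int) (h0 : 0 ≤ t) (h1 : t < n) (g : β → β) (m : β) :
    (PySem.List.pyRange 0 n 1).foldl (fun acc j => if t == j then g acc else acc) m = g m := by
  rw [PySem.List.pyRange_one_append 0 t n h0 (le_of_lt h1), List.foldl_append,
    PySem.List.pyRange_one_cons h1]
  have hpre : List.foldl (fun acc j => if t == j then g acc else acc) m (PySem.List.pyRange 0 t 1) = m := by
    rw [PySem.List.foldl_congr_mem _ _ (fun acc _ => acc) m
      (by intro acc j hj
          rcases (PySem.List.mem_pyRange_one).1 hj with ⟨_, hjt⟩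
          simp [show t ≠ j by omega])]
    exact pv_foldl_const _ m
  rw [hpre, List.foldl_cons]
  simp only [BEq.rfl, if_true]
  rw [PySem.List.foldl_congr_mem _ _ (fun acc _ => acc) (g m)
    (by intro acc j hj
        rcases (PySem.List.mem_pyRange_one).1 hj with ⟨hjt, _⟩
        simp [show t ≠ j by omega])]
  exact pv_foldl_const _ (g m)

-- A's inner scan over range(n) collapses to the single update at j = i % n
theorem pv_inner_collapse (fila : List Int) (n i : Int) (hn : 0 < n) (m : List (List Int)) :
    List.foldl (fun m2 j =>
        if PySem.Int.mod i n == j then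
          PySem.List.pySetD m2 j (PySem.List.pyGetD m2 j [] ++ [PySem.List.pyGetD fila i 0])
        else m2) m (PySem.List.pyRange 0 n 1)
    = PySem.List.pySetD m (PySem.Int.mod i n)
        (PySem.List.pyGetD m (PySem.Int.mod i n) [] ++ [PySem.List.pyGetD fila i 0]) := by
  have hmod : 0 ≤ PySem.Int.mod i n ∧ PySem.Int.mod i n < n := by
    rw [PySem.Int.mod_eq_emod_of_pos hn]
    exact ⟨Int.emod_nonneg i (ne_of_gt hn), Int.emod_lt_of_pos i hn⟩
  rw [PySem.List.foldl_congr_mem _ _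
    (fun m2 j => if PySem.Int.mod i n == j then
        PySem.List.pySetD m2 (PySem.Int.mod i n)
          (PySem.List.pyGetD m2 (PySem.Int.mod i n) [] ++ [PySem.List.pyGetD fila i 0])
      else m2) m
    (by intro m2 j _
        by_cases hij : PySem.Int.mod i n = j
        · subst hij; simp
        · simp [hij])]
  exact pv_foldl_range_ite n (PySem.Int.mod i n) hmod.1 hmod.2 _ m

-- ===== VERDICT (by name: the statement is the Claim_ definition above) =====
theorem filas_de_atendimento_spec : Claim_equal_filas_de_atendimento := by
  intro fila n _
  unfold Spec_filas_de_atendimento filas_de_atendimento filas_de_atendimento_alt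
  by_cases hn : n ≤ 0
  · simp only [hn, if_true, PySem.List.pyRange_one_eq_nil hn, List.foldl_nil]
    exact pv_foldl_const _ []
  · replace hn := lt_of_not_ge hn
    simp only [not_le.2 hn, if_false]
    rw [PySem.List.foldl_append_singleton_eq_map (f := fun (_ : Int) => ([] : List Int))]
    simp only [List.nil_append]
    rw [PySem.List.enumerate_eq_map_pyRange fila 0, List.foldl_map]
    exact PySem.List.foldl_congr_mem _ _ _ _
      (fun m i _ => pv_inner_collapse fila n i hn m)
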